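-- pv_equiv track=rewrite | github.com/tomvit/ja2mqtt | ja2mqtt/components/serial.py | decode_prfstate
-- ===== SOURCE A (Python) =====
-- class SerialJA121TException(Exception):
--     pass
--
-- def decode_prfstate(prfstate):
--     """
--     Decode prfstate from a hexadecimal string to a dictionary, where the keys
--     represent the peripheral IDs and the values represent the state (ON/OFF)
--     of the respective peripherals. For details see JA-121T documentation.
--     """
--     try:
--         parts = [
--             bin(int(prfstate[i : i + 2], 16))[2:].zfill(8)
--             for i in range(0, len(prfstate), 2)
--         ]
--
--         peripherals = {}
--         for x in range(0, int(len(prfstate) / 2)):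
--             j = 0
--             for y in range(x * 8 + 7, x * 8 - 1, -1):
--                 peripherals[y] = parts[x][j]
--                 j += 1
--
--         return {
--             str(k): ("ON" if peripherals[k] == "1" else "OFF")
--             for k in sorted(peripherals.keys())
--         }
--     except Exception as e:
--         raise SerialJA121TException(
--             f"Cannot decode prfstate string {prfstate}. {str(e)}"
--         )
-- ===== SOURCE B (Python) =====
-- class SerialJA121TException(Exception):
--     pass
--
-- def decode_prfstate(prfstate):
--     """
--     Decode prfstate from a hexadecimal string to a dictionary mapping
--     peripheral IDs (as strings, in increasing order) to "ON"/"OFF".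
--     """
--     try:
--         nibbles = [int(c, 16) for c in prfstate]
--         return {
--             str(k): ("ON" if (nibbles[2 * (k // 8)] * 16 + nibbles[2 * (k // 8) + 1]) >> (k % 8) & 1 else "OFF")
--             for k in range((len(prfstate) // 2) * 8)
--         }
--     except Exception as e:
--         raise SerialJA121TException(
--             f"Cannot decode prfstate string {prfstate}. {str(e)}"
--         )
-- ===== Notes on version B (the rewrite author's own statement) =====
-- stated objective: simpler
-- what changed: B parses each hex character once into a nibble value and reads every peripheral's bit with an integer shift in a single dict comprehension already in key order, dropping A's MSB-first binary strings, the reversed inner indexing loop, the intermediate int-keyed dict and the final sorted() pass.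
import Mathlib
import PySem

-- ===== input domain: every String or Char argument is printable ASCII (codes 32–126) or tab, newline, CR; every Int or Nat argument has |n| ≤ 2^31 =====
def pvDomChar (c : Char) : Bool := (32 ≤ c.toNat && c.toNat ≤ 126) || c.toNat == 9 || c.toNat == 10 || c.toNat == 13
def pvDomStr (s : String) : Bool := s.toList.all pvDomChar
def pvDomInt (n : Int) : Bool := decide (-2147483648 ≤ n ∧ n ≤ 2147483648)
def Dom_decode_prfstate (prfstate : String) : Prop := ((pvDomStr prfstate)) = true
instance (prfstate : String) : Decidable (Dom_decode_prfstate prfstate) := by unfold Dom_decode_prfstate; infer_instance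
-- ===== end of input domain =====

-- B decodes each peripheral bit by integer shifting over once-parsed nibble values, in key
-- order directly (objective: simpler); A builds zero-padded binary strings, an int-keyed dict
-- filled by a reversed inner loop, and sorts the keys at the end.

-- ===== PORT A =====
-- value of one hex digit (exact for the hex-digit characters, the only ones Pre_ admits)
def pvHexVal (c : Char) : Nat :=
  if 48 ≤ c.toNat ∧ c.toNat ≤ 57 then c.toNat - 48
  else if 97 ≤ c.toNat ∧ c.toNat ≤ 102 then c.toNat - 87
  else if 65 ≤ c.toNat ∧ c.toNat ≤ 70 then c.toNat - 55
  else 0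

-- int(t, 16): exact on nonempty hex-digit strings (the only slices Pre_ reaches)
def pvIntHex (t : List Char) : Nat := t.foldl (fun a c => 16 * a + pvHexVal c) 0

-- .zfill(8)
def pvZfill8 (l : List Char) : List Char := List.replicate (8 - l.length) '0' ++ l

def decode_prfstate (prfstate : String) : List (String × String) :=
  let cs := prfstate.toList
  -- parts = [bin(int(prfstate[i:i+2], 16))[2:].zfill(8) for i in range(0, len(prfstate), 2)]
  -- (bin(n)[2:] is PySem.Int.toBinChars for the nonnegative values pvIntHex yields)
  let parts : List (List Char) :=
    (PySem.List.pyRange 0 (PySem.Str.len prfstate) 2).map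
      (fun i => pvZfill8 (PySem.Int.toBinChars
        ((pvIntHex (PySem.List.slice cs (some i) (some (i + 2))) : Nat) : Int)))
  -- peripherals = {}; for x in range(0, int(len(prfstate)/2)): j = 0; for y in range(x*8+7, x*8-1, -1): peripherals[y] = parts[x][j]; j += 1
  let peripherals : PySem.Dict Int Char :=
    (PySem.List.pyRange 0 ((cs.length / 2 : Nat) : Int) 1).foldl
      (fun d x =>
        ((PySem.List.pyRange (x * 8 + 7) (x * 8 - 1) (-1)).foldl
          (fun (dj : PySem.Dict Int Char × Int) y =>
            (dj.1.insert y (PySem.List.pyGetD (PySem.List.pyGetD parts x []) dj.2 ' '),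
             dj.2 + 1))
          (d, 0)).1)
      PySem.Dict.empty
  -- {str(k): ("ON" if peripherals[k] == "1" else "OFF") for k in sorted(peripherals.keys())}
  (PySem.List.sorted (PySem.Dict.keys peripherals) (fun k => k) false).map
    (fun k => (PySem.Int.toStr k, if peripherals.getD k ' ' = '1' then "ON" else "OFF"))

-- ===== PORT B =====
def decode_prfstate_alt (prfstate : String) : List (String × String) :=
  -- nibbles = [int(c, 16) for c in prfstate]  (int(c, 16): exact on hex digits, the only ones Pre_ admits)
  let nibbles : List Nat := prfstate.toList.map pvHexVal
  -- {str(k): ("ON" if (nibbles[2*(k//8)]*16 + nibbles[2*(k//8)+1]) >> (k % 8) & 1 else "OFF") for k in range((len(prfstate)//2)*8)}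
  (List.range ((prfstate.toList.length / 2) * 8)).map
    (fun (k : Nat) =>
      (PySem.Int.toStr (k : Int),
       if ((nibbles.getD (2 * (k / 8)) 0 * 16 + nibbles.getD (2 * (k / 8) + 1) 0) >>> (k % 8)) &&& 1 = 1
       then "ON" else "OFF"))

-- ===== PRECONDITION & SPEC =====
-- Pre_ excludes strings containing a non-hex-digit character: on those A raises
-- SerialJA121TException, except where int(_, 16)'s leniency about whitespace and signs lets a
-- 2-char slice like ' 7' or '-5' parse, where A's returned bit pattern (read off bin() of a
-- possibly negative int) is an accident of its string slicing; B's per-character parsing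
-- raises on all of them.
def Pre_decode_prfstate (prfstate : String) : Prop :=
  prfstate.toList.all (fun c =>
    (48 ≤ c.toNat && c.toNat ≤ 57) || (97 ≤ c.toNat && c.toNat ≤ 102) || (65 ≤ c.toNat && c.toNat ≤ 70)) = true
instance (prfstate : String) : Decidable (Pre_decode_prfstate prfstate) := by
  unfold Pre_decode_prfstate; infer_instance

def pvWitness_decode_prfstate : String := "81"

def Spec_decode_prfstate (prfstate : String) (out : List (String × String)) : Prop :=
  out = decode_prfstate_alt prfstate
instance (prfstate : String) (out : List (String × String)) : Decidable (Spec_decode_prfstate prfstate out) := by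
  unfold Spec_decode_prfstate; infer_instance

-- ===== CLAIM (what is proved, stated in full; the proofs are below) =====
def Claim_equal_decode_prfstate : Prop :=
  ∀ (prfstate : String), Dom_decode_prfstate prfstate → Pre_decode_prfstate prfstate →
    Spec_decode_prfstate prfstate (decode_prfstate prfstate)

-- ===== LEMMAS AND PROOFS =====

-- proof-side restatement of A's lets
def pvParts (s : String) : List (List Char) :=
  (PySem.List.pyRange 0 (PySem.Str.len s) 2).map
    (fun i => pvZfill8 (PySem.Int.toBinChars
      ((pvIntHex (PySem.List.slice s.toList (some i) (some (i + 2))) : Nat) : Int)))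

def pvPeri (s : String) : PySem.Dict Int Char :=
  (PySem.List.pyRange 0 ((s.toList.length / 2 : Nat) : Int) 1).foldl
    (fun d x =>
      ((PySem.List.pyRange (x * 8 + 7) (x * 8 - 1) (-1)).foldl
        (fun (dj : PySem.Dict Int Char × Int) y =>
          (dj.1.insert y (PySem.List.pyGetD (PySem.List.pyGetD (pvParts s) x []) dj.2 ' '),
           dj.2 + 1))
        (d, 0)).1)
    PySem.Dict.empty

theorem decode_eq (s : String) :
    decode_prfstate s =
      (PySem.List.sorted (PySem.Dict.keys (pvPeri s)) (fun k => k) false).map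
        (fun k => (PySem.Int.toStr k, if (pvPeri s).getD k ' ' = '1' then "ON" else "OFF")) := rfl

theorem pvHexVal_lt (c : Char) : pvHexVal c < 16 := by
  unfold pvHexVal; split_ifs <;> omega

set_option maxRecDepth 4096 in
theorem pvBits : ∀ b : Fin 256,
    pvZfill8 (PySem.Int.toBinChars ((b : Nat) : Int)) =
      (List.range 8).map (fun j => if ((b : Nat) >>> (7 - j)) &&& 1 = 1 then '1' else '0') := by
  decide

-- nibble list shorthand
def pvNib (s : String) : List Nat := s.toList.map pvHexVal

-- byte value of row x
def pvByte (s : String) (x : Nat) : Nat :=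
  16 * (pvNib s).getD (2 * x) 0 + (pvNib s).getD (2 * x + 1) 0

theorem pvNib_getD (s : String) (i : Nat) (hi : i < s.toList.length) :
    (pvNib s).getD i 0 = pvHexVal (s.toList.getD i ' ') := by
  rw [List.getD_eq_getElem _ _ (by simpa [pvNib] using hi),
      List.getD_eq_getElem _ _ hi]
  simp [pvNib]

theorem pvByte_lt (s : String) (x : Nat) : pvByte s x < 256 := by
  have h1 : (pvNib s).getD (2 * x) 0 < 16 := by
    rcases Nat.lt_or_ge (2 * x) (pvNib s).length with h | h
    · rw [List.getD_eq_getElem _ _ h]; simp [pvNib]; exact pvHexVal_lt _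
    · rw [List.getD_eq_default _ _ h]; omega
  have h2 : (pvNib s).getD (2 * x + 1) 0 < 16 := by
    rcases Nat.lt_or_ge (2 * x + 1) (pvNib s).length with h | h
    · rw [List.getD_eq_getElem _ _ h]; simp [pvNib]; exact pvHexVal_lt _
    · rw [List.getD_eq_default _ _ h]; omega
  unfold pvByte; omega

theorem pvParts_row (s : String) (x : Nat) (hx : x < s.toList.length / 2) :
    PySem.List.pyGetD (pvParts s) (x : Int) [] =
      pvZfill8 (PySem.Int.toBinChars ((pvByte s x : Nat) : Int)) := by
  have hlen : 2 * x + 1 < s.toList.length := by omega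
  have hx0 : x < (if (0:Int) < PySem.Str.len s then (((PySem.Str.len s) - 0 + 2 - 1) / 2).toNat else 0) := by
    rw [PySem.Str.len_eq]
    rw [if_pos (by exact_mod_cast (by omega : 0 < s.toList.length))]
    omega
  unfold pvParts
  rw [PySem.List.pyRange_of_pos 0 (PySem.Str.len s) (by norm_num)]
  rw [List.map_map]
  rw [PySem.List.pyGetD_natCast]
  rw [List.getD_eq_getElem _ _ (by simpa using hx0)]
  simp only [List.getElem_map, List.getElem_range, Function.comp_apply]
  have harg : (0 : Int) + 2 * (x : Int) = ((2 * x : Nat) : Int) := by push_cast; ring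
  rw [harg]
  have harg2 : ((2 * x : Nat) : Int) + 2 = ((2 * x : Nat) : Int) + ((2 : Nat) : Int) := by norm_cast
  rw [harg2, PySem.List.slice_natCast_add]
  have hdrop : (s.toList.drop (2 * x)).take 2 = [s.toList[2 * x], s.toList[2 * x + 1]] := by
    rw [List.drop_eq_getElem_cons (by omega), List.drop_eq_getElem_cons (by omega)]
    rfl
  rw [hdrop]
  have : pvIntHex [s.toList[2 * x], s.toList[2 * x + 1]] = pvByte s x := by
    simp only [pvIntHex, List.foldl, pvByte]
    rw [pvNib_getD s _ (by omega), pvNib_getD s _ (by omega)]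
    rw [List.getD_eq_getElem _ _ (by omega), List.getD_eq_getElem _ _ (by omega)]
    ring
  rw [this]

def pvBitChar (s : String) (k : Nat) : Char :=
  if ((pvByte s (k / 8)) >>> (k % 8)) &&& 1 = 1 then '1' else '0'

set_option maxRecDepth 4096 in
theorem pvRow_bit (s : String) (x : Nat) (hx : x < s.toList.length / 2) (j : Nat) (hj : j < 8) :
    PySem.List.pyGetD (PySem.List.pyGetD (pvParts s) (x : Int) []) (j : Int) ' ' =
      if ((pvByte s x) >>> (7 - j)) &&& 1 = 1 then '1' else '0' := by
  rw [pvParts_row s x hx, PySem.List.pyGetD_natCast]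
  have hb := pvBits ⟨pvByte s x, pvByte_lt s x⟩
  rw [show ((⟨pvByte s x, pvByte_lt s x⟩ : Fin 256) : Nat) = pvByte s x from rfl] at hb
  rw [hb]
  rw [List.getD_eq_getElem _ _ (by simpa using hj)]
  simp

theorem pvVal (s : String) (x k j : Nat) (hx : x < s.toList.length / 2) (hj : j < 8)
    (hk : k = 8 * x + (7 - j)) :
    PySem.List.pyGetD (PySem.List.pyGetD (pvParts s) (x : Int) []) (j : Int) ' ' =
      pvBitChar s k := by
  rw [pvRow_bit s x hx j hj]; unfold pvBitChar
  have h1 : k / 8 = x := by omega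
  have h2 : k % 8 = 7 - j := by omega
  rw [h1, h2]

def pvStep (s : String) (d : PySem.Dict Int Char) (x : Int) : PySem.Dict Int Char :=
  ((PySem.List.pyRange (x * 8 + 7) (x * 8 - 1) (-1)).foldl
    (fun (dj : PySem.Dict Int Char × Int) y =>
      (dj.1.insert y (PySem.List.pyGetD (PySem.List.pyGetD (pvParts s) x []) dj.2 ' '),
       dj.2 + 1))
    (d, 0)).1

theorem pvInner (s : String) (d : PySem.Dict Int Char) (x : Int) :
    pvStep s d x =
      (d.insert (x*8+7) (PySem.List.pyGetD (PySem.List.pyGetD (pvParts s) x []) 0 ' ')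
        |>.insert (x*8+6) (PySem.List.pyGetD (PySem.List.pyGetD (pvParts s) x []) 1 ' ')
        |>.insert (x*8+5) (PySem.List.pyGetD (PySem.List.pyGetD (pvParts s) x []) 2 ' ')
        |>.insert (x*8+4) (PySem.List.pyGetD (PySem.List.pyGetD (pvParts s) x []) 3 ' ')
        |>.insert (x*8+3) (PySem.List.pyGetD (PySem.List.pyGetD (pvParts s) x []) 4 ' ')
        |>.insert (x*8+2) (PySem.List.pyGetD (PySem.List.pyGetD (pvParts s) x []) 5 ' ')
        |>.insert (x*8+1) (PySem.List.pyGetD (PySem.List.pyGetD (pvParts s) x []) 6 ' ')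
        |>.insert (x*8) (PySem.List.pyGetD (PySem.List.pyGetD (pvParts s) x []) 7 ' ')) := by
  have hr : PySem.List.pyRange (x*8+7) (x*8-1) (-1) =
      [x*8+7, x*8+6, x*8+5, x*8+4, x*8+3, x*8+2, x*8+1, x*8] := by
    rw [PySem.List.pyRange_neg_one]
    have h8 : (x*8+7 - (x*8-1)) = 8 := by ring
    rw [h8, show Int.toNat 8 = 8 from rfl]
    simp [List.range_succ]
    constructor <;> ring_nf
    simp
  unfold pvStep
  rw [hr]
  norm_num [List.foldl]

def pvPeriUpTo (s : String) (m : Nat) : PySem.Dict Int Char :=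
  (PySem.List.pyRange 0 (m : Int) 1).foldl (fun d x => pvStep s d x) PySem.Dict.empty

theorem pvPeri_eq (s : String) : pvPeri s = pvPeriUpTo s (s.toList.length / 2) := rfl

theorem pvInv (s : String) (m : Nat) (hm : m ≤ s.toList.length / 2) :
    (pvPeriUpTo s m).keys.Nodup ∧
    (∀ k : Int, k ∈ (pvPeriUpTo s m).keys ↔ 0 ≤ k ∧ k < 8 * m) ∧
    (∀ k : Nat, k < 8 * m → (pvPeriUpTo s m).getD (k : Int) ' ' = pvBitChar s k) := by
  induction m with
  | zero =>
    refine ⟨by simp [pvPeriUpTo, PySem.List.pyRange_one_eq_nil], ?_, ?_⟩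
    · intro k; simp [pvPeriUpTo, PySem.List.pyRange_one_eq_nil]
    · intro k hk; omega
  | succ m ih =>
    have hm' : m ≤ s.toList.length / 2 := by omega
    obtain ⟨ihnd, ihmem, ihget⟩ := ih hm'
    have hstep : pvPeriUpTo s (m+1) = pvStep s (pvPeriUpTo s m) (m : Int) := by
      unfold pvPeriUpTo
      rw [show ((m+1 : Nat) : Int) = (m : Int) + 1 by push_cast; ring]
      rw [PySem.List.pyRange_one_succ_right (by positivity)]
      rw [List.foldl_append]
      rfl
    rw [hstep, pvInner]
    have hx : m < s.toList.length / 2 := by omega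
    refine ⟨?_, ?_, ?_⟩
    · exact PySem.Dict.nodup_keys_insert _ _ _ (PySem.Dict.nodup_keys_insert _ _ _
        (PySem.Dict.nodup_keys_insert _ _ _ (PySem.Dict.nodup_keys_insert _ _ _
        (PySem.Dict.nodup_keys_insert _ _ _ (PySem.Dict.nodup_keys_insert _ _ _
        (PySem.Dict.nodup_keys_insert _ _ _ (PySem.Dict.nodup_keys_insert _ _ _ ihnd)))))))
    · intro k
      simp only [PySem.Dict.mem_keys_insert, ihmem]
      omega
    · intro k hk
      simp only [PySem.Dict.getD_insert]
      rcases Nat.lt_or_ge k (8 * m) with hlt | hge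
      · rw [if_neg (by omega), if_neg (by omega), if_neg (by omega), if_neg (by omega),
            if_neg (by omega), if_neg (by omega), if_neg (by omega), if_neg (by omega)]
        exact ihget k hlt
      · have hr : k - 8 * m < 8 := by omega
        interval_cases h : (k - 8 * m)
        · rw [if_pos (by omega)]
          exact_mod_cast pvVal s m k 7 hx (by omega) (by omega)
        · rw [if_neg (by omega), if_pos (by omega)]
          exact_mod_cast pvVal s m k 6 hx (by omega) (by omega)
        · rw [if_neg (by omega), if_neg (by omega), if_pos (by omega)]
          exact_mod_cast pvVal s m k 5 hx (by omega) (by omega)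
        · rw [if_neg (by omega), if_neg (by omega), if_neg (by omega), if_pos (by omega)]
          exact_mod_cast pvVal s m k 4 hx (by omega) (by omega)
        · rw [if_neg (by omega), if_neg (by omega), if_neg (by omega), if_neg (by omega),
              if_pos (by omega)]
          exact_mod_cast pvVal s m k 3 hx (by omega) (by omega)
        · rw [if_neg (by omega), if_neg (by omega), if_neg (by omega), if_neg (by omega),
              if_neg (by omega), if_pos (by omega)]
          exact_mod_cast pvVal s m k 2 hx (by omega) (by omega)
        · rw [if_neg (by omega), if_neg (by omega), if_neg (by omega), if_neg (by omega),
              if_neg (by omega), if_neg (by omega), if_pos (by omega)]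
          exact_mod_cast pvVal s m k 1 hx (by omega) (by omega)
        · rw [if_neg (by omega), if_neg (by omega), if_neg (by omega), if_neg (by omega),
              if_neg (by omega), if_neg (by omega), if_neg (by omega), if_pos (by omega)]
          exact_mod_cast pvVal s m k 0 hx (by omega) (by omega)

theorem decode_prfstate_agree (s : String) : decode_prfstate s = decode_prfstate_alt s := by
  obtain ⟨hnd, hmem, hget⟩ := pvInv s (s.toList.length / 2) le_rfl
  rw [decode_eq, pvPeri_eq]
  have hys : PySem.List.sorted (PySem.Dict.keys (pvPeriUpTo s (s.toList.length / 2))) (fun k => k) false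
      = List.map (fun k : Nat => (k : Int)) (List.range (8 * (s.toList.length / 2))) := by
    apply PySem.List.sorted_eq_of_perm_of_pairwise_lt
    · rw [List.perm_ext_iff_of_nodup (List.nodup_range.map (fun a b h => by exact_mod_cast h)) hnd]
      intro a
      rw [hmem a]
      simp only [List.mem_map, List.mem_range]
      constructor
      · rintro ⟨b, hb, rfl⟩; constructor <;> [positivity; exact_mod_cast hb]
      · rintro ⟨h0, h8⟩; exact ⟨a.toNat, by omega, by omega⟩
    · exact List.Pairwise.map _ (fun a b h => by exact_mod_cast h) List.pairwise_lt_range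
  rw [hys, List.map_map]
  simp only [decode_prfstate_alt]
  rw [Nat.mul_comm (s.toList.length / 2) 8]
  apply List.map_congr_left
  intro k hk
  rw [List.mem_range] at hk
  simp only [Function.comp_apply]
  rw [hget k hk]
  unfold pvBitChar
  have hb : pvByte s (k / 8) =
      (s.toList.map pvHexVal).getD (2 * (k / 8)) 0 * 16 + (s.toList.map pvHexVal).getD (2 * (k / 8) + 1) 0 := by
    unfold pvByte pvNib; ring
  rw [hb]
  split_ifs <;> simp_all

-- ===== VERDICT (by name: the statement is the Claim_ definition above) =====
theorem decode_prfstate_spec : Claim_equal_decode_prfstate := by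
  intro s _ _
  unfold Spec_decode_prfstate
  exact decode_prfstate_agree s
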